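-- pv_equiv track=rewrite | github.com/treebbb/cribserver | simulate_kitty.py | simulate_play
-- ===== SOURCE A (Python) =====
-- import itertools
-- from collections import defaultdict
--
-- def card_value(card):
--     return min(card[0], 10)
--
-- def score_play_sequence(play_seq, is_dealer):
--     my_score = 0
--     opp_score = 0
--     total = 0
--     # Assume non-dealer (you) starts; if dealer, opponent starts
--     my_turns = range(0, 8, 2) if not is_dealer else range(1, 8, 2)
--
--     # Track all cards played so far
--     played_cards = []
--     value_counts = defaultdict(int)  # Count of each card value
--
--     for i, card in enumerate(play_seq):
--         total += card_value(card)
--         is_my_turn = i in my_turns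
--         played_cards.append(card)
--         current_value = card_value(card)
--         value_counts[current_value] += 1
--
--         # Score 15 or 31
--         if total == 15:
--             if is_my_turn:
--                 my_score += 2
--             else:
--                 opp_score += 2
--         elif total == 31:
--             if is_my_turn:
--                 my_score += 2
--             else:
--                 opp_score += 2
--
--         # Pairs, triplets, quads (any combination of played cards)
--         if value_counts[current_value] == 2:
--             if is_my_turn:
--                 my_score += 2  # Pair
--             else:
--                 opp_score += 2
--         elif value_counts[current_value] == 3:
--             if is_my_turn:
--                 my_score += 4  # Triplet (additional 4, total 6)
--             else:
--                 opp_score += 4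
--         elif value_counts[current_value] == 4:
--             if is_my_turn:
--                 my_score += 6  # Quad (additional 6, total 12)
--             else:
--                 opp_score += 6
--
--         # Runs (check all subsets of played cards for runs of 3+)
--         current_values = sorted([card_value(c) for c in played_cards])
--         for length in range(3, min(len(played_cards) + 1, 6)):  # Check runs of 3 to 5
--             for subset in itertools.combinations(current_values, length):
--                 if max(subset) - min(subset) == length - 1 and len(set(subset)) == length:
--                     # Valid run (consecutive values, no duplicates)
--                     if is_my_turn:
--                         my_score += length
--                     else:
--                         opp_score += length
--
--     return my_score
--
-- def simulate_play(my_hand, opp_hand, starter):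
--     max_score = 0
--     my_cards = list(my_hand)
--     opp_cards = list(opp_hand)
--
--     # Generate all possible play sequences (alternating)
--     for my_order in itertools.permutations(my_cards, 4):
--         for opp_order in itertools.permutations(opp_cards, 4):
--             play_seq = []
--             i, j = 0, 0
--             total = 0
--             while i < 4 or j < 4:
--                 # My turn
--                 if i < 4 and (j == 4 or total + card_value(my_order[i]) <= 31):
--                     play_seq.append(my_order[i])
--                     total += card_value(my_order[i])
--                     i += 1
--                 # Opponent's turn
--                 elif j < 4 and (i == 4 or total + card_value(opp_order[j]) <= 31):
--                     play_seq.append(opp_order[j])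
--                     total += card_value(opp_order[j])
--                     j += 1
--                 else:
--                     total = 0  # Reset count after a "go"
--                     if i < 4 and j < 4:
--                         continue
--                     break
--             if i == 4 and j == 4:  # Valid sequence uses all cards
--                 score = score_play_sequence(play_seq, is_dealer=True)
--                 max_score = max(max_score, score)
--
--     return max_score
-- ===== SOURCE B (Python) =====
-- # B: recursive re-implementation -- the greedy alternation pops list heads
-- # recursively instead of walking indices, pegging is scored by a structural
-- # recursion over the sequence with a turn flag, and runs are counted
-- # combinatorially (L times the product of per-value counts over each
-- # consecutive window) instead of enumerating itertools.combinations subsets;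
-- # the best score is the max over a flat list of all ordering pairs.
-- # Objective: alternative (different algorithm, similar cost).
-- import itertools
--
--
-- def card_value(card):
--     return min(card[0], 10)
--
--
-- def _deal(mine, opp, total):
--     # greedy alternation: pop whichever head may legally play, resetting on "go"
--     if not mine and not opp:
--         return []
--     if mine and (not opp or total + card_value(mine[0]) <= 31):
--         return [mine[0]] + _deal(mine[1:], opp, total + card_value(mine[0]))
--     if opp and (not mine or total + card_value(opp[0]) <= 31):
--         return [opp[0]] + _deal(mine, opp[1:], total + card_value(opp[0]))
--     return _deal(mine, opp, 0)  # "go": reset the count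
--
--
-- def _score(seq, total, counts, mine, n):
--     # dealer's (our) points in the rest of the sequence; `mine` flags whose turn
--     if not seq:
--         return 0
--     v = card_value(seq[0])
--     total += v
--     n += 1
--     counts = dict(counts)
--     counts[v] = counts.get(v, 0) + 1
--     pts = 2 if total == 15 or total == 31 else 0
--     k = counts[v]
--     if 2 <= k <= 4:
--         pts += 2 * (k - 1)
--     for L in range(3, min(n, 5) + 1):
--         for b in counts:
--             prod = 1
--             for w in range(b, b + L):
--                 prod *= counts.get(w, 0)
--             pts += L * prod
--     rest = _score(seq[1:], total, counts, not mine, n)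
--     return pts + rest if mine else rest
--
--
-- def simulate_play(my_hand, opp_hand, starter):
--     scores = [_score(_deal(list(mo), list(oo), 0), 0, {}, False, 0)
--               for mo in itertools.permutations(my_hand, 4)
--               for oo in itertools.permutations(opp_hand, 4)]
--     return max([0] + scores)
-- ===== Notes on version B (the rewrite author's own statement) =====
-- stated objective: alternative
-- what changed: The greedy alternation is a head-popping recursion on the two orderings instead of an index-walking while loop, pegging is scored by a structural recursion over the sequence with a turn flag instead of an enumerate/state loop, runs are counted combinatorially (each consecutive value window of length 3..5 contributes length times the product of per-value counts) instead of enumerating all itertools.combinations subsets, and the result is the max over a flat list of scores instead of nested accumulator loops.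
import Mathlib
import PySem

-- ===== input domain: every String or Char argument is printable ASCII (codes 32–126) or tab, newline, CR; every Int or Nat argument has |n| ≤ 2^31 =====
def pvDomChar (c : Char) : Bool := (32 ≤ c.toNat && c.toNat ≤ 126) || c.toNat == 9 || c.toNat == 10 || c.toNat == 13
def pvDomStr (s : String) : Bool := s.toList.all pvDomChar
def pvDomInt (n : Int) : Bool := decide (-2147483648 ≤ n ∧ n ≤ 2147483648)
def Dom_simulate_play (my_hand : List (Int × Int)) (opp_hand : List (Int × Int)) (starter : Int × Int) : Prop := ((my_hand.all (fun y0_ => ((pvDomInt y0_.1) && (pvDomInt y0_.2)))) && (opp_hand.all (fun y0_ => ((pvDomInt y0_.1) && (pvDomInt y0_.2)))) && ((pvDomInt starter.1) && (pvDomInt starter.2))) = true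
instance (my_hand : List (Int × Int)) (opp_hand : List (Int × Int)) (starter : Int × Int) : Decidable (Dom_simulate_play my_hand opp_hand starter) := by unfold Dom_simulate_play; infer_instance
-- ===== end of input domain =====

-- ===== PORT A =====
-- B re-implements the same pegging maximisation with a head-popping recursive
-- alternation, a recursive scorer with a turn flag and combinatorial run
-- counting, and a flat max over all ordering pairs (objective: alternative).

-- card_value(card)
def card_value (card : Int × Int) : Int := min card.1 10

-- the while-loop of simulate_play: state (i, j, total, play_seq); returns (play_seq, i, j).
-- my_order/opp_order are indexed with i < 4 / j < 4 and always have length 4 at call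
-- sites (itertools.permutations(_, 4)), so the .getD default is never read: exact.
def pvGreedyA (fuel : Nat) (mo oo : List (Int × Int)) (i j : Nat) (total : Int)
    (seq : List (Int × Int)) : List (Int × Int) × Nat × Nat :=
  match fuel with
  | 0 => (seq, i, j)  -- fuel is a totality guard only; simulate_play supplies enough
  | fuel + 1 =>
    if i < 4 ∨ j < 4 then
      if i < 4 ∧ (j = 4 ∨ total + card_value (mo.getD i (0, 0)) ≤ 31) then
        pvGreedyA fuel mo oo (i + 1) j (total + card_value (mo.getD i (0, 0)))
          (seq ++ [mo.getD i (0, 0)])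
      else if j < 4 ∧ (i = 4 ∨ total + card_value (oo.getD j (0, 0)) ≤ 31) then
        pvGreedyA fuel mo oo i (j + 1) (total + card_value (oo.getD j (0, 0)))
          (seq ++ [oo.getD j (0, 0)])
      else if i < 4 ∧ j < 4 then
        pvGreedyA fuel mo oo i j 0 seq     -- total = 0; continue
      else (seq, i, j)                     -- total = 0; break
    else (seq, i, j)

-- score_play_sequence(play_seq, is_dealer); state (my_score, opp_score, total, played_cards, value_counts).
-- max(subset)/min(subset) are taken with .getD 0: every subset produced by
-- itertools.combinations with length ≥ 3 is nonempty, so the default is never read: exact.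
-- the body of the for-loop of score_play_sequence
def pvStepA (my_turns : List Int)
    (st : Int × Int × Int × List (Int × Int) × PySem.Dict Int Int)
    (ic : Int × (Int × Int)) : Int × Int × Int × List (Int × Int) × PySem.Dict Int Int :=
      let i := ic.1
      let card := ic.2
      let my_score := st.1
      let opp_score := st.2.1
      let total := st.2.2.1 + card_value card
      let is_my_turn := my_turns.contains i
      let played_cards := st.2.2.2.1 ++ [card]
      let current_value := card_value card
      let value_counts := st.2.2.2.2.modify current_value 0 (· + 1)  -- defaultdict increment
      -- 15 or 31
      let mo : Int × Int :=
        if total = 15 then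
          (if is_my_turn then (my_score + 2, opp_score) else (my_score, opp_score + 2))
        else if total = 31 then
          (if is_my_turn then (my_score + 2, opp_score) else (my_score, opp_score + 2))
        else (my_score, opp_score)
      -- pairs / triplets / quads
      let mo : Int × Int :=
        if value_counts.getD current_value 0 = 2 then
          (if is_my_turn then (mo.1 + 2, mo.2) else (mo.1, mo.2 + 2))
        else if value_counts.getD current_value 0 = 3 then
          (if is_my_turn then (mo.1 + 4, mo.2) else (mo.1, mo.2 + 4))
        else if value_counts.getD current_value 0 = 4 then
          (if is_my_turn then (mo.1 + 6, mo.2) else (mo.1, mo.2 + 6))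
        else mo
      -- runs: all subsets of played cards, lengths 3..5
      let current_values :=
        PySem.List.sorted (played_cards.map (fun c => card_value c)) (fun x => x) false
      let mo : Int × Int :=
        (PySem.List.pyRange 3 (min ((played_cards.length : Int) + 1) 6) 1).foldl
          (fun mo length =>
            (PySem.List.combinations current_values length.toNat).foldl
              (fun (mo : Int × Int) subset =>
                if (PySem.List.max? subset (fun x => x)).getD 0
                      - (PySem.List.min? subset (fun x => x)).getD 0 = length - 1
                    ∧ ((PySem.Set.ofList subset).length : Int) = length then
                  (if is_my_turn then (mo.1 + length, mo.2) else (mo.1, mo.2 + length))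
                else mo)
              mo)
          mo
      (mo.1, mo.2, total, played_cards, value_counts)

def score_play_sequence (play_seq : List (Int × Int)) (is_dealer : Bool) : Int :=
  let my_turns : List Int := if ¬ is_dealer then PySem.List.pyRange 0 8 2 else PySem.List.pyRange 1 8 2
  let st := (PySem.List.enumerate play_seq 0).foldl (pvStepA my_turns)
    (0, 0, 0, ([] : List (Int × Int)), (PySem.Dict.empty : PySem.Dict Int Int))
  st.1

def simulate_play (my_hand : List (Int × Int)) (opp_hand : List (Int × Int))
    (starter : Int × Int) : Int :=
  let my_cards := my_hand
  let opp_cards := opp_hand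
  (PySem.List.permutations my_cards 4).foldl
    (fun max_score my_order =>
      (PySem.List.permutations opp_cards 4).foldl
        (fun max_score opp_order =>
          let r := pvGreedyA 100 my_order opp_order 0 0 0 []
          if r.2.1 = 4 ∧ r.2.2 = 4 then
            max max_score (score_play_sequence r.1 true)
          else max_score)
        max_score)
    0

-- ===== PORT B =====

-- _deal(mine, opp, total): greedy alternation popping list heads; mine[0]/opp[0]
-- is headD guarded by the nonempty test, so the default is never read: exact.
def pvDeal (fuel : Nat) (mine opp : List (Int × Int)) (total : Int) : List (Int × Int) :=
  match fuel with
  | 0 => []  -- fuel is a totality guard only; simulate_play_alt supplies enough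
  | fuel + 1 =>
    if mine = [] ∧ opp = [] then []
    else if mine ≠ [] ∧ (opp = [] ∨ total + card_value (mine.headD (0, 0)) ≤ 31) then
      mine.headD (0, 0) :: pvDeal fuel mine.tail opp (total + card_value (mine.headD (0, 0)))
    else if opp ≠ [] ∧ (mine = [] ∨ total + card_value (opp.headD (0, 0)) ≤ 31) then
      opp.headD (0, 0) :: pvDeal fuel mine opp.tail (total + card_value (opp.headD (0, 0)))
    else pvDeal fuel mine opp 0            -- "go": reset the count

-- _score(seq, total, counts, mine, n): structural recursion on the sequence;
-- seq[0] / seq[1:] are the cons pattern, counts is a functional dict copy.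
def pvScoreRec (seq : List (Int × Int)) (total : Int) (counts : PySem.Dict Int Int)
    (mine : Bool) (n : Int) : Int :=
  match seq with
  | [] => 0
  | card :: rest =>
    let v := card_value card
    let total := total + v
    let n := n + 1
    let counts := counts.insert v (counts.getD v 0 + 1)
    let pts : Int := if total = 15 ∨ total = 31 then 2 else 0
    let k := counts.getD v 0
    let pts := if 2 ≤ k ∧ k ≤ 4 then pts + 2 * (k - 1) else pts
    let pts :=
      (PySem.List.pyRange 3 (min n 5 + 1) 1).foldl
        (fun pts L =>
          counts.keys.foldl
            (fun (pts : Int) b =>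
              pts + L * ((PySem.List.pyRange b (b + L) 1).foldl
                (fun prod w => prod * counts.getD w 0) 1))
            pts)
        pts
    let restScore := pvScoreRec rest total counts (!mine) n
    if mine then pts + restScore else restScore

def simulate_play_alt (my_hand : List (Int × Int)) (opp_hand : List (Int × Int))
    (starter : Int × Int) : Int :=
  let scores := (PySem.List.permutations my_hand 4).flatMap
    (fun mo => (PySem.List.permutations opp_hand 4).map
      (fun oo => pvScoreRec (pvDeal 100 mo oo 0) 0 PySem.Dict.empty false 0))
  -- max([0] + scores) is the running binary max over scores started from 0
  scores.foldl max 0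

-- ===== PRECONDITION & SPEC =====
def Spec_simulate_play (my_hand : List (Int × Int)) (opp_hand : List (Int × Int)) (starter : Int × Int) (out : Int) : Prop := out = simulate_play_alt my_hand opp_hand starter
instance (my_hand : List (Int × Int)) (opp_hand : List (Int × Int)) (starter : Int × Int) (out : Int) : Decidable (Spec_simulate_play my_hand opp_hand starter out) := by unfold Spec_simulate_play; infer_instance

-- ===== CLAIM (what is proved, stated in full; the proofs are below) =====
def Claim_equal_simulate_play : Prop := ∀ (my_hand : List (Int × Int)) (opp_hand : List (Int × Int)) (starter : Int × Int), Dom_simulate_play my_hand opp_hand starter → Spec_simulate_play my_hand opp_hand starter (simulate_play my_hand opp_hand starter)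

-- ===== LEMMAS AND PROOFS =====

-- ---------- proof-side definitions ----------

-- the run condition score_play_sequence tests on one subset, for run length L
def pvPredB (L : Int) (s : List Int) : Bool :=
  decide ((PySem.List.max? s (fun x => x)).getD 0 - (PySem.List.min? s (fun x => x)).getD 0 = L - 1
    ∧ ((PySem.Set.ofList s).length : Int) = L)

-- number of qualifying subsets among the combinations, as counted by port A
def pvC (vals : List Int) (L : Int) : Nat :=
  (PySem.List.combinations (PySem.List.sorted vals (fun x => x) false) L.toNat).countP
    (pvPredB L)

-- ---------- generic fold lemmas ----------

theorem pv_countP_eq_sum {α β : Type} [DecidableEq β] (l : List α) (p : α → Bool)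
    (T : Finset β) (q : β → α → Bool)
    (h : ∀ s ∈ l, (if p s then 1 else 0) = ∑ b ∈ T, if q b s then (1 : ℕ) else 0) :
    l.countP p = ∑ b ∈ T, l.countP (q b) := by
  induction l with
  | nil => simp
  | cons x t ih =>
    simp only [List.countP_cons]
    rw [ih (fun s hs => h s (List.mem_cons_of_mem _ hs)), Finset.sum_add_distrib]
    congr 1
    exact h x List.mem_cons_self

theorem pv_countP_congr {α : Type} {p q : α → Bool} {l : List α}
    (h : ∀ a ∈ l, p a = q a) : l.countP p = l.countP q := by
  induction l with
  | nil => rfl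
  | cons x t ih =>
    simp only [List.countP_cons, h x List.mem_cons_self,
      ih (fun a ha => h a (List.mem_cons_of_mem _ ha))]

theorem pv_range_prod (g : ℕ → ℕ) (n : ℕ) :
    ((List.range n).map g).prod = ∏ k ∈ Finset.range n, g k := by
  induction n with
  | zero => simp
  | succ m ih =>
    rw [List.range_succ, Finset.prod_range_succ, List.map_append, List.prod_append, ih]
    simp

-- ---------- the combinatorial core ----------

-- combinations containing each element of F exactly once, counted by the product of counts
theorem pv_combo_count (xs : List Int) (F : Finset Int) :
    (PySem.List.combinations xs F.card).countP
        (fun (s : List Int) => decide ((↑s : Multiset Int) = F.val))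
      = ∏ v ∈ F, xs.count v := by
  induction xs generalizing F with
  | nil =>
    rcases Nat.eq_zero_or_pos F.card with h0 | hpos
    · have hF : F = ∅ := Finset.card_eq_zero.mp h0
      subst hF
      simp [PySem.List.combinations_zero]
    · obtain ⟨r, hr⟩ : ∃ r, F.card = r + 1 := ⟨F.card - 1, by omega⟩
      obtain ⟨v, hv⟩ := Finset.card_pos.mp hpos
      rw [hr, PySem.List.combinations_nil_succ, List.countP_nil]
      symm
      exact Finset.prod_eq_zero hv (by simp)
  | cons x t ih =>
    rcases Nat.eq_zero_or_pos F.card with h0 | hpos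
    · have hF : F = ∅ := Finset.card_eq_zero.mp h0
      subst hF
      simp [PySem.List.combinations_zero]
    · obtain ⟨r, hr⟩ : ∃ r, F.card = r + 1 := ⟨F.card - 1, by omega⟩
      rw [hr, PySem.List.combinations_cons_succ, List.countP_append, List.countP_map]
      by_cases hx : x ∈ F
      · have hrE : (F.erase x).card = r := by
          rw [Finset.card_erase_of_mem hx]; omega
        have hval : F.val = x ::ₘ (F.erase x).val := by
          rw [F.erase_val x]
          exact (Multiset.cons_erase (Finset.mem_val.mpr hx)).symm
        have h1 : List.countP
              ((fun (s : List Int) => decide ((↑s : Multiset Int) = F.val)) ∘ (x :: ·))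
              (PySem.List.combinations t r)
            = List.countP (fun (s : List Int) => decide ((↑s : Multiset Int) = (F.erase x).val))
              (PySem.List.combinations t r) := by
          apply pv_countP_congr
          intro a _
          simp only [Function.comp_apply, decide_eq_decide]
          rw [← Multiset.cons_coe, hval]
          exact Multiset.cons_inj_right x
        rw [h1]
        have e1 := ih (F.erase x)
        rw [hrE] at e1
        have e2 := ih F
        rw [hr] at e2
        rw [e1, e2]
        have hP : ∏ v ∈ F.erase x, (x :: t).count v = ∏ v ∈ F.erase x, t.count v := by
          refine Finset.prod_congr rfl ?_
          intro v hv
          exact List.count_cons_of_ne (Ne.symm (Finset.ne_of_mem_erase hv))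
        have hxF : ∏ v ∈ F, (x :: t).count v
            = (t.count x + 1) * ∏ v ∈ F.erase x, t.count v := by
          rw [← Finset.mul_prod_erase F (fun v => (x :: t).count v) hx, hP,
            List.count_cons_self]
        have hF : ∏ v ∈ F, t.count v = t.count x * ∏ v ∈ F.erase x, t.count v :=
          (Finset.mul_prod_erase F (fun v => t.count v) hx).symm
        rw [hxF, hF]
        ring
      · have h1 : List.countP
              ((fun (s : List Int) => decide ((↑s : Multiset Int) = F.val)) ∘ (x :: ·))
              (PySem.List.combinations t r) = 0 := by
          apply List.countP_eq_zero.mpr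
          intro a _
          simp only [Function.comp_apply, decide_eq_true_eq]
          intro hcontra
          apply hx
          have : x ∈ F.val := by
            rw [← hcontra, ← Multiset.cons_coe]
            exact Multiset.mem_cons_self x _
          exact Finset.mem_val.mp this
        rw [h1]
        have e2 := ih F
        rw [hr] at e2
        rw [e2, Nat.zero_add]
        refine Finset.prod_congr rfl ?_
        intro v hv
        exact (List.count_cons_of_ne (by
          intro hvx
          apply hx
          rw [hvx]
          exact hv)).symm

theorem pv_pred_pointwise (xs : List Int) (L : Nat) (hL : 1 ≤ L) (s : List Int)
    (hs : s ∈ PySem.List.combinations xs L) :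
    (if pvPredB (L : Int) s = true then 1 else 0)
      = ∑ b ∈ xs.toFinset,
          if decide ((↑s : Multiset Int) = (Finset.Icc b (b + L - 1)).val) = true
          then (1 : ℕ) else 0 := by
  have hslen : s.length = L := PySem.List.length_of_mem_combinations hs
  have hsub : s.Sublist xs := PySem.List.sublist_of_mem_combinations hs
  have hne : s ≠ [] := by
    intro h
    rw [h] at hslen
    simp at hslen
    omega
  obtain ⟨M, hM⟩ : ∃ M, PySem.List.max? s (fun x => x) = some M := by
    cases hM : PySem.List.max? s (fun x => x) with
    | none => exact absurd ((PySem.List.max?_eq_none_iff _ _).mp hM) hne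
    | some M => exact ⟨M, rfl⟩
  obtain ⟨m, hm⟩ : ∃ m, PySem.List.min? s (fun x => x) = some m := by
    cases hm : PySem.List.min? s (fun x => x) with
    | none => exact absurd ((PySem.List.min?_eq_none_iff _ _).mp hm) hne
    | some m => exact ⟨m, rfl⟩
  have hMmem : M ∈ s := PySem.List.max?_mem hM
  have hMmax : ∀ y ∈ s, y ≤ M := PySem.List.max?_isMax hM
  have hmmem : m ∈ s := PySem.List.min?_mem hm
  have hmmin : ∀ y ∈ s, m ≤ y := PySem.List.min?_isMin hm
  have hofl : (PySem.Set.ofList s).toFinset = s.toFinset := by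
    ext v
    simp [List.mem_toFinset, PySem.Set.mem_ofList]
  by_cases hp : ((PySem.List.max? s (fun x => x)).getD 0
      - (PySem.List.min? s (fun x => x)).getD 0 = (L : Int) - 1
    ∧ ((PySem.Set.ofList s).length : Int) = (L : Int))
  · obtain ⟨hp1, hp2⟩ := hp
    rw [hM, hm] at hp1
    simp only [Option.getD_some] at hp1
    have hcard : s.toFinset.card = L := by
      rw [← hofl, List.toFinset_card_of_nodup (PySem.Set.nodup_ofList s)]
      exact_mod_cast hp2
    have hnd : s.Nodup := by
      apply List.dedup_eq_self.mp
      apply List.Sublist.eq_of_length (List.dedup_sublist s)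
      rw [← List.card_toFinset, hcard, hslen]
    have hsub2 : s.toFinset ⊆ Finset.Icc m M := by
      intro v hv
      rw [List.mem_toFinset] at hv
      rw [Finset.mem_Icc]
      exact ⟨hmmin v hv, hMmax v hv⟩
    have hIccCard : (Finset.Icc m M).card = L := by
      rw [Int.card_Icc]
      omega
    have hEq : s.toFinset = Finset.Icc m M :=
      Finset.eq_of_subset_of_card_le hsub2 (by omega)
    have hval : (↑s : Multiset Int) = (Finset.Icc m (m + L - 1)).val := by
      have hM' : M = m + (L : Int) - 1 := by omega
      rw [← hM', ← hEq]
      have : s.toFinset.val = (↑s : Multiset Int).dedup := rfl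
      rw [this, Multiset.dedup_eq_self.mpr (by exact_mod_cast hnd)]
    rw [if_pos (by simp only [pvPredB, decide_eq_true_eq]; exact ⟨by rw [hM, hm]; simpa using hp1, hp2⟩)]
    have hmmemT : m ∈ xs.toFinset := List.mem_toFinset.mpr (hsub.subset hmmem)
    rw [Finset.sum_eq_single_of_mem m hmmemT]
    · rw [if_pos (by simp only [decide_eq_true_eq]; exact hval)]
    · intro b _ hbm
      rw [if_neg]
      simp only [decide_eq_true_eq]
      intro hcontra
      apply hbm
      have hbIcc : b ∈ Finset.Icc b (b + L - 1) := by
        rw [Finset.mem_Icc]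
        omega
      have hbs : b ∈ s := by
        have : b ∈ (Finset.Icc b (b + L - 1)).val := Finset.mem_val.mpr hbIcc
        rw [← hcontra] at this
        exact_mod_cast this
      have hble : ∀ y ∈ s, b ≤ y := by
        intro y hy
        have : y ∈ (Finset.Icc b (b + L - 1)).val := by
          rw [← hcontra]
          exact_mod_cast hy
        rw [Finset.mem_val, Finset.mem_Icc] at this
        exact this.1
      have h1 := hmmin b hbs
      have h2 := hble m hmmem
      omega
  · rw [if_neg (by simpa [pvPredB] using hp)]
    symm
    apply Finset.sum_eq_zero
    intro b _
    rw [if_neg]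
    simp only [decide_eq_true_eq]
    intro hcontra
    apply hp
    have hmemIff : ∀ y, y ∈ s ↔ b ≤ y ∧ y ≤ b + L - 1 := by
      intro y
      constructor
      · intro hy
        have : y ∈ (Finset.Icc b (b + L - 1)).val := by
          rw [← hcontra]; exact_mod_cast hy
        rw [Finset.mem_val, Finset.mem_Icc] at this
        exact this
      · intro hy
        have : y ∈ (Finset.Icc b (b + L - 1)).val :=
          Finset.mem_val.mpr (Finset.mem_Icc.mpr hy)
        rw [← hcontra] at this
        exact_mod_cast this
    have hnd : s.Nodup := by
      have : (↑s : Multiset Int).Nodup := by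
        rw [hcontra]
        exact (Finset.Icc b (b + L - 1)).nodup
      exact_mod_cast this
    have hbs : b ∈ s := (hmemIff b).mpr (by omega)
    have hm' : m = b := by
      have h1 := hmmin b hbs
      have h2 := ((hmemIff m).mp hmmem).1
      omega
    have hM' : M = b + L - 1 := by
      have h1 := hMmax _ ((hmemIff (b + L - 1)).mpr (by omega))
      have h2 := ((hmemIff M).mp hMmem).2
      omega
    constructor
    · rw [hM, hm]
      simp only [Option.getD_some]
      omega
    · rw [PySem.Set.ofList_eq_self_of_nodup s hnd, hslen]

theorem pv_prod_Icc (f : Int → Nat) (b : Int) (L : Nat) :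
    ∏ v ∈ Finset.Icc b (b + L - 1), f v = ∏ k ∈ Finset.range L, f (b + k) := by
  refine Finset.prod_nbij' (fun v => (v - b).toNat) (fun k => b + (k : Int)) ?_ ?_ ?_ ?_ ?_
  · intro v hv
    simp only [Finset.mem_Icc] at hv
    simp only [Finset.mem_range]
    omega
  · intro k hk
    simp only [Finset.mem_range] at hk
    simp only [Finset.mem_Icc]
    omega
  · intro v hv
    simp only [Finset.mem_Icc] at hv
    dsimp only
    omega
  · intro k hk
    simp only [Finset.mem_range] at hk
    dsimp only
    omega
  · intro v hv
    simp only [Finset.mem_Icc] at hv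
    dsimp only
    congr 1
    omega

theorem pv_run_count (vals : List Int) (L : Nat) (hL : 1 ≤ L) :
    pvC vals (L : Int)
      = ∑ b ∈ vals.toFinset, ∏ k ∈ Finset.range L, vals.count (b + k) := by
  unfold pvC
  have hperm : (PySem.List.sorted vals (fun x => x) false).Perm vals :=
    PySem.List.sorted_perm vals _ _
  have hTF : (PySem.List.sorted vals (fun x => x) false).toFinset = vals.toFinset :=
    List.toFinset_eq_of_perm _ _ hperm
  rw [Int.toNat_natCast]
  rw [pv_countP_eq_sum _ _ (PySem.List.sorted vals (fun x => x) false).toFinset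
    (fun b (s : List Int) => decide ((↑s : Multiset Int) = (Finset.Icc b (b + L - 1)).val))
    (pv_pred_pointwise _ L hL)]
  rw [hTF]
  refine Finset.sum_congr rfl ?_
  intro b _
  have hcard : (Finset.Icc b (b + L - 1)).card = L := by
    rw [Int.card_Icc]
    omega
  have hc := pv_combo_count (PySem.List.sorted vals (fun x => x) false)
    (Finset.Icc b (b + L - 1))
  rw [hcard] at hc
  rw [hc, pv_prod_Icc]
  refine Finset.prod_congr rfl ?_
  intro k _
  exact hperm.count_eq _

-- ---------- A's run-scoring fold ----------

theorem pv_countP_pvC (vals : List Int) (L : Int) :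
    (PySem.List.combinations (PySem.List.sorted vals (fun x => x) false) L.toNat).countP
      (fun s => decide ((PySem.List.max? s (fun x => x)).getD 0
          - (PySem.List.min? s (fun x => x)).getD 0 = L - 1
        ∧ ((PySem.Set.ofList s).length : Int) = L))
      = pvC vals L := by
  unfold pvC
  exact pv_countP_congr (fun a _ => by simp [pvPredB])

theorem pv_pair_fold {α : Type} (p : α → Prop) [DecidablePred p] (c : Int) (l : List α)
    (is_my : Bool) (mo : Int × Int) :
    l.foldl (fun mo s =>
        if p s then (if is_my then (mo.1 + c, mo.2) else (mo.1, mo.2 + c)) else mo) mo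
      = (mo.1 + (if is_my then c * (l.countP (fun s => decide (p s)) : Int) else 0),
         mo.2 + (if is_my then 0 else c * (l.countP (fun s => decide (p s)) : Int))) := by
  induction l generalizing mo with
  | nil => simp
  | cons x t ih =>
    simp only [List.foldl_cons, List.countP_cons, ih]
    by_cases hx : p x
    · simp only [if_pos hx, decide_eq_true hx]
      cases is_my <;> simp <;> push_cast <;> ring
    · simp [hx]

theorem pv_cast_list_prod (l : List ℕ) :
    ((l.prod : ℕ) : ℤ) = (l.map (fun (n : ℕ) => (n : ℤ))).prod := by
  induction l with
  | nil => simp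
  | cons x t ih => simp [ih]

theorem pv_foldl_mul (g : ℕ → Int) (l : List ℕ) (a : Int) :
    l.foldl (fun pr k => pr * g k) a = a * (l.map g).prod := by
  induction l generalizing a with
  | nil => simp
  | cons x t ih =>
    simp only [List.foldl_cons, List.map_cons, List.prod_cons, ih]
    ring

theorem pv_runsA_fold (vals : List Int) (Ls : List Int) (mo : Int × Int) (is_my : Bool) :
    Ls.foldl
        (fun mo length =>
          (PySem.List.combinations (PySem.List.sorted vals (fun x => x) false)
              length.toNat).foldl
            (fun (mo : Int × Int) subset =>
              if (PySem.List.max? subset (fun x => x)).getD 0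
                    - (PySem.List.min? subset (fun x => x)).getD 0 = length - 1
                  ∧ ((PySem.Set.ofList subset).length : Int) = length then
                (if is_my then (mo.1 + length, mo.2) else (mo.1, mo.2 + length))
              else mo)
            mo)
        mo
      = (mo.1 + (if is_my then (Ls.map (fun L => L * (pvC vals L : Int))).sum else 0),
         mo.2 + (if is_my then 0 else (Ls.map (fun L => L * (pvC vals L : Int))).sum)) := by
  induction Ls generalizing mo with
  | nil => simp
  | cons L Ls ih =>
    simp only [List.foldl_cons, List.map_cons, List.sum_cons]
    rw [pv_pair_fold _ L _ is_my mo, ih, pv_countP_pvC]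
    cases is_my <;> simp <;> ring

-- the per-card score increment, written with port A's branch structure
def pvDelta (total k : Int) (vals : List Int) (n : Int) : Int :=
  (if total = 15 then 2 else if total = 31 then 2 else 0)
    + (if k = 2 then 2 else if k = 3 then 4 else if k = 4 then 6 else 0)
    + ((PySem.List.pyRange 3 (min (n + 1) 6) 1).map (fun L => L * (pvC vals L : Int))).sum

theorem pvStepA_char (my opp total : Int) (played : List (Int × Int))
    (cnt : PySem.Dict Int Int) (i : Int) (card : Int × Int) :
    pvStepA (PySem.List.pyRange 1 8 2) (my, opp, total, played, cnt) (i, card)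
      = (my + (if (PySem.List.pyRange 1 8 2).contains i then
            pvDelta (total + card_value card) (cnt.getD (card_value card) 0 + 1)
              ((played ++ [card]).map (fun c => card_value c))
              (((played ++ [card]).length : Int)) else 0),
         opp + (if (PySem.List.pyRange 1 8 2).contains i then 0 else
            pvDelta (total + card_value card) (cnt.getD (card_value card) 0 + 1)
              ((played ++ [card]).map (fun c => card_value c))
              (((played ++ [card]).length : Int))),
         total + card_value card,
         played ++ [card],
         cnt.modify (card_value card) 0 (· + 1)) := by
  unfold pvStepA
  dsimp only
  rw [PySem.Dict.getD_modify_self, pv_runsA_fold]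
  unfold pvDelta
  cases hmy : (PySem.List.pyRange 1 8 2).contains i
  · simp only [Bool.false_eq_true, if_false]
    split_ifs <;> dsimp only <;> ring
  · simp only [if_true]
    split_ifs <;> dsimp only <;> ring

-- ---------- B's run-scoring folds ----------

theorem pv_foldl_add {α : Type} (g : α → Int) (l : List α) (a : Int) :
    l.foldl (fun acc b => acc + g b) a = a + (l.map g).sum := by
  induction l generalizing a with
  | nil => simp
  | cons x t ih =>
    simp only [List.foldl_cons, List.map_cons, List.sum_cons, ih]
    ring

theorem pv_runsRec_per_L (vals : List Int) (cnt : PySem.Dict Int Int)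
    (hcnt : ∀ v, cnt.getD v 0 = (vals.count v : Int))
    (hnd : cnt.keys.Nodup) (hmem : ∀ v, v ∈ cnt.keys ↔ v ∈ vals)
    (L : Int) (hL : 3 ≤ L) (pts : Int) :
    cnt.keys.foldl
        (fun (pts : Int) b =>
          pts + L * ((PySem.List.pyRange b (b + L) 1).foldl
            (fun prod w => prod * cnt.getD w 0) 1))
        pts
      = pts + L * (pvC vals L : Int) := by
  have hL0 : ((L.toNat : Nat) : Int) = L := Int.toNat_of_nonneg (by omega)
  have hprod : ∀ b : Int,
      ((PySem.List.pyRange b (b + L) 1).foldl (fun prod w => prod * cnt.getD w 0) 1)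
        = ((∏ k ∈ Finset.range L.toNat, vals.count (b + (k : Int)) : Nat) : Int) := by
    intro b
    rw [PySem.List.pyRange_one]
    have hls : (b + L - b) = L := by ring
    rw [hls, List.foldl_map, pv_foldl_mul, one_mul]
    rw [List.map_congr_left (fun (k : ℕ) (_ : k ∈ List.range L.toNat) => hcnt (b + (k : Int)))]
    rw [← pv_range_prod (fun k => vals.count (b + (k : Int))) L.toNat]
    rw [pv_cast_list_prod, List.map_map]
    rfl
  rw [pv_foldl_add
    (fun b => L * ((PySem.List.pyRange b (b + L) 1).foldl (fun prod w => prod * cnt.getD w 0) 1))]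
  rw [List.map_congr_left (fun b (_ : b ∈ cnt.keys) => by rw [hprod b])]
  rw [List.sum_map_mul_left]
  congr 1
  have hTF : cnt.keys.toFinset = vals.toFinset := by
    ext v
    rw [List.mem_toFinset, List.mem_toFinset]
    exact hmem v
  rw [← List.sum_toFinset _ hnd, hTF]
  have hrc := pv_run_count vals L.toNat (by omega)
  rw [hL0] at hrc
  rw [hrc]
  push_cast
  rfl

theorem pv_runsRec_fold (vals : List Int) (cnt : PySem.Dict Int Int)
    (hcnt : ∀ v, cnt.getD v 0 = (vals.count v : Int))
    (hnd : cnt.keys.Nodup) (hmem : ∀ v, v ∈ cnt.keys ↔ v ∈ vals)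
    (Ls : List Int) (hLs : ∀ L ∈ Ls, 3 ≤ L) (pts : Int) :
    Ls.foldl
        (fun pts L =>
          cnt.keys.foldl
            (fun (pts : Int) b =>
              pts + L * ((PySem.List.pyRange b (b + L) 1).foldl
                (fun prod w => prod * cnt.getD w 0) 1))
            pts)
        pts
      = pts + (Ls.map (fun L => L * (pvC vals L : Int))).sum := by
  induction Ls generalizing pts with
  | nil => simp
  | cons L Ls ih =>
    simp only [List.foldl_cons, List.map_cons, List.sum_cons]
    rw [pv_runsRec_per_L vals cnt hcnt hnd hmem L (hLs L List.mem_cons_self) pts]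
    rw [ih (fun L' hL' => hLs L' (List.mem_cons_of_mem _ hL'))]
    ring

-- one step of B's recursive scorer, characterized through pvDelta
theorem pvScoreRec_cons (card : Int × Int) (rest : List (Int × Int)) (total : Int)
    (cnt : PySem.Dict Int Int) (mine : Bool) (n : Int) (vals : List Int)
    (hc : ∀ w,
        ((cnt.insert (card_value card) (cnt.getD (card_value card) 0 + 1)).getD w 0)
          = (vals.count w : Int))
    (hnd : (cnt.insert (card_value card) (cnt.getD (card_value card) 0 + 1)).keys.Nodup)
    (hm : ∀ w, w ∈ (cnt.insert (card_value card) (cnt.getD (card_value card) 0 + 1)).keys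
        ↔ w ∈ vals) :
    pvScoreRec (card :: rest) total cnt mine n
      = (if mine then
            pvDelta (total + card_value card) (cnt.getD (card_value card) 0 + 1) vals (n + 1)
          else 0)
        + pvScoreRec rest (total + card_value card)
            (cnt.insert (card_value card) (cnt.getD (card_value card) 0 + 1)) (!mine) (n + 1) := by
  rw [pvScoreRec]
  rw [PySem.Dict.getD_insert_self]
  have hb : min (n + 1) 5 + 1 = min ((n + 1) + 1) 6 := by omega
  rw [hb]
  rw [pv_runsRec_fold vals _ hc hnd hm _
    (fun L hL => ((PySem.List.mem_pyRange_one).mp hL).1) _]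
  unfold pvDelta
  cases mine
  · simp only [Bool.false_eq_true, if_false, Int.zero_add, Bool.not_false]
  · simp only [if_true, Bool.not_true]
    split_ifs <;> ring_nf <;> omega

-- ---------- turn parity ----------

theorem pv_turn_nat (m : Nat) (h : m < 8) :
    (PySem.List.pyRange 1 8 2).contains ((m : Nat) : Int) = decide (m % 2 = 1) := by
  interval_cases m <;> decide

theorem pv_parity_succ (m : Nat) :
    decide ((m + 1) % 2 = 1) = !decide (m % 2 = 1) := by
  rcases Nat.mod_two_eq_zero_or_one m with h | h <;> simp [Nat.add_mod, h]

-- ---------- the scoring loops, coupled ----------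

theorem pv_couple (rest : List (Int × Int)) : ∀ (pref : List (Int × Int))
    (my opp total : Int) (acnt bcnt : PySem.Dict Int Int),
    (∀ v, acnt.getD v 0 = ((pref.map card_value).count v : Int)) →
    (∀ v, bcnt.getD v 0 = ((pref.map card_value).count v : Int)) →
    bcnt.keys.Nodup →
    (∀ v, v ∈ bcnt.keys ↔ v ∈ pref.map card_value) →
    pref.length + rest.length ≤ 8 →
    ((PySem.List.enumerate rest (pref.length : Int)).foldl
        (pvStepA (PySem.List.pyRange 1 8 2)) (my, opp, total, pref, acnt)).1
      = my + pvScoreRec rest total bcnt (decide (pref.length % 2 = 1)) (pref.length : Int) := by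
  induction rest with
  | nil =>
    intro pref my opp total acnt bcnt _ _ _ _ _
    simp [pvScoreRec, PySem.List.enumerate]
  | cons x rest ih =>
    intro pref my opp total acnt bcnt hA hB1 hB2 hB3 hlen
    rw [PySem.List.enumerate_cons]
    simp only [List.foldl_cons]
    rw [pvStepA_char]
    set v := card_value x with hv
    -- properties of the updated dictionaries w.r.t. pref ++ [x]
    have hA' : ∀ w, (acnt.modify v 0 (· + 1)).getD w 0
        = (((pref ++ [x]).map card_value).count w : Int) := by
      intro w
      rw [List.map_append]
      by_cases hw : w = v
      · subst hw
        rw [PySem.Dict.getD_modify_self, hA, List.count_append]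
        simp [hv]
      · rw [PySem.Dict.getD_modify_of_ne _ _ _ hw, hA, List.count_append]
        have hcc : List.count w (List.map card_value [x]) = 0 := by
          rw [List.count_eq_zero]
          intro hmem
          simp at hmem
          exact hw (by rw [hv]; omega)
        rw [hcc]
        simp
    have hkeys : (bcnt.insert v (bcnt.getD v 0 + 1)).keys = PySem.Set.add bcnt.keys v := by
      have hk := PySem.Dict.keys_foldl_insert [v] (fun d y => d.getD y 0 + 1) bcnt
      simpa [PySem.Set.update_cons, PySem.Set.update_nil] using hk
    have hB1' : ∀ w, (bcnt.insert v (bcnt.getD v 0 + 1)).getD w 0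
        = (((pref ++ [x]).map card_value).count w : Int) := by
      intro w
      rw [List.map_append]
      by_cases hw : w = v
      · subst hw
        rw [PySem.Dict.getD_insert_self, hB1, List.count_append]
        simp [hv]
      · rw [PySem.Dict.getD_insert_of_ne _ _ _ hw, hB1, List.count_append]
        have hcc : List.count w (List.map card_value [x]) = 0 := by
          rw [List.count_eq_zero]
          intro hmem
          simp at hmem
          exact hw (by rw [hv]; omega)
        rw [hcc]
        simp
    have hB2' : (bcnt.insert v (bcnt.getD v 0 + 1)).keys.Nodup := by
      rw [hkeys]
      exact PySem.Set.nodup_add _ _ hB2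
    have hB3' : ∀ w, w ∈ (bcnt.insert v (bcnt.getD v 0 + 1)).keys
        ↔ w ∈ (pref ++ [x]).map card_value := by
      intro w
      rw [hkeys, PySem.Set.mem_add, List.map_append, List.mem_append, hB3]
      simp [hv, eq_comm]
    have hlen' : (((pref ++ [x]).length : Nat) : Int) = (pref.length : Int) + 1 := by
      simp
    have hrec := ih (pref ++ [x]) (my + (if (PySem.List.pyRange 1 8 2).contains
        ((pref.length : Nat) : Int) then
          pvDelta (total + v) (acnt.getD v 0 + 1)
            ((pref ++ [x]).map (fun c => card_value c)) (((pref ++ [x]).length : Int))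
        else 0))
      (opp + (if (PySem.List.pyRange 1 8 2).contains ((pref.length : Nat) : Int) then 0 else
          pvDelta (total + v) (acnt.getD v 0 + 1)
            ((pref ++ [x]).map (fun c => card_value c)) (((pref ++ [x]).length : Int))))
      (total + v) (acnt.modify v 0 (· + 1)) (bcnt.insert v (bcnt.getD v 0 + 1))
      hA' hB1' hB2' hB3' (by simp at hlen ⊢; omega)
    rw [hlen'] at hrec
    rw [hlen', hrec]
    -- now rewrite the head of B's scorer
    rw [pvScoreRec_cons x rest total bcnt _ _ ((pref ++ [x]).map card_value)
      hB1' hB2' hB3']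
    have hmap : ((pref ++ [x]).map (fun c => card_value c)) = ((pref ++ [x]).map card_value) :=
      rfl
    have hk : acnt.getD v 0 = bcnt.getD v 0 := by rw [hA, hB1]
    have hturn : (PySem.List.pyRange 1 8 2).contains ((pref.length : Nat) : Int)
        = decide (pref.length % 2 = 1) := pv_turn_nat pref.length (by simp at hlen; omega)
    have hpar : decide ((pref ++ [x]).length % 2 = 1) = !decide (pref.length % 2 = 1) := by
      rw [List.length_append, List.length_cons, List.length_nil]
      exact pv_parity_succ pref.length
    have hn : ((pref ++ [x]).length : Int) = (pref.length : Int) + 1 := hlen'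
    rw [hmap, hk, hturn, hpar]
    rw [← hv]
    ring

theorem pv_score_eq (seq : List (Int × Int)) (h : seq.length ≤ 8) :
    score_play_sequence seq true
      = pvScoreRec seq 0 (PySem.Dict.empty : PySem.Dict Int Int) false 0 := by
  unfold score_play_sequence
  simp only [Bool.not_eq_true, if_neg]
  have h0 := pv_couple seq [] 0 0 0 PySem.Dict.empty PySem.Dict.empty
    (by intro v; simp [PySem.Dict.getD, PySem.Dict.get?, PySem.Dict.empty])
    (by intro v; simp [PySem.Dict.getD, PySem.Dict.get?, PySem.Dict.empty])
    (by simp [PySem.Dict.keys, PySem.Dict.empty])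
    (by intro v; simp [PySem.Dict.keys, PySem.Dict.empty])
    (by simpa using h)
  simpa using h0

-- ---------- the greedy loops, coupled ----------

theorem pv_headD_drop (l : List (Int × Int)) (i : Nat) :
    (l.drop i).headD (0, 0) = l.getD i (0, 0) := by
  induction l generalizing i with
  | nil => simp
  | cons x t ih =>
    cases i with
    | zero => simp
    | succ m => simpa using ih m

theorem pv_greedy_deal (mo oo : List (Int × Int)) (hmo : mo.length = 4)
    (hoo : oo.length = 4) : ∀ (fuel : Nat) (i j : Nat) (total : Int)
    (seq : List (Int × Int)), i ≤ 4 → j ≤ 4 →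
    2 * ((4 - i) + (4 - j)) + (if total = 0 then 0 else 1) + 1 ≤ fuel →
    pvGreedyA fuel mo oo i j total seq
      = (seq ++ pvDeal fuel (mo.drop i) (oo.drop j) total, 4, 4) := by
  intro fuel
  induction fuel with
  | zero =>
    intro i j total seq _ _ hf
    exfalso
    omega
  | succ fuel ih =>
    intro i j total seq hi hj hf
    by_cases hloop : i < 4 ∨ j < 4
    · by_cases h1 : i < 4 ∧ (j = 4 ∨ total + card_value (mo.getD i (0, 0)) ≤ 31)
      · obtain ⟨hi4, hcond⟩ := h1
        have hdm : mo.drop i ≠ [] := by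
          rw [ne_eq, List.drop_eq_nil_iff]
          omega
        rw [pvGreedyA, if_pos hloop, if_pos ⟨hi4, hcond⟩]
        rw [pvDeal, if_neg (fun hcc => hdm hcc.1), if_pos ⟨hdm, by
          rcases hcond with hj4 | hle
          · exact Or.inl (by rw [List.drop_eq_nil_iff]; omega)
          · exact Or.inr (by rw [pv_headD_drop]; exact hle)⟩]
        rw [pv_headD_drop, List.tail_drop]
        rw [ih (i + 1) j _ _ (by omega) hj (by
          split_ifs at hf ⊢ <;> omega)]
        simp
      · by_cases h2 : j < 4 ∧ (i = 4 ∨ total + card_value (oo.getD j (0, 0)) ≤ 31)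
        · obtain ⟨hj4, hcond⟩ := h2
          have hdo : oo.drop j ≠ [] := by
            rw [ne_eq, List.drop_eq_nil_iff]
            omega
          have hfail : ¬ (mo.drop i ≠ [] ∧ (oo.drop j = [] ∨
              total + card_value ((mo.drop i).headD (0, 0)) ≤ 31)) := by
            rintro ⟨hdm, hc⟩
            apply h1
            refine ⟨by rw [ne_eq, List.drop_eq_nil_iff] at hdm; omega, ?_⟩
            rcases hc with hc | hc
            · exact Or.inl (by rw [List.drop_eq_nil_iff] at hc; omega)
            · exact Or.inr (by rw [pv_headD_drop] at hc; exact hc)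
          rw [pvGreedyA, if_pos hloop, if_neg h1, if_pos ⟨hj4, hcond⟩]
          rw [pvDeal, if_neg (fun hcc => hdo hcc.2), if_neg hfail, if_pos ⟨hdo, by
            rcases hcond with hi4 | hle
            · exact Or.inl (by rw [List.drop_eq_nil_iff]; omega)
            · exact Or.inr (by rw [pv_headD_drop]; exact hle)⟩]
          rw [pv_headD_drop, List.tail_drop]
          rw [ih i (j + 1) _ _ hi (by omega) (by
            split_ifs at hf ⊢ <;> omega)]
          simp
        · by_cases hij : i < 4 ∧ j < 4
          · obtain ⟨hi4, hj4⟩ := hij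
            have hdm : mo.drop i ≠ [] := by
              rw [ne_eq, List.drop_eq_nil_iff]
              omega
            have hfail1 : ¬ (mo.drop i ≠ [] ∧ (oo.drop j = [] ∨
                total + card_value ((mo.drop i).headD (0, 0)) ≤ 31)) := by
              rintro ⟨_, hc⟩
              apply h1
              refine ⟨hi4, ?_⟩
              rcases hc with hc | hc
              · exact Or.inl (by rw [List.drop_eq_nil_iff] at hc; omega)
              · exact Or.inr (by rw [pv_headD_drop] at hc; exact hc)
            have hfail2 : ¬ (oo.drop j ≠ [] ∧ (mo.drop i = [] ∨
                total + card_value ((oo.drop j).headD (0, 0)) ≤ 31)) := by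
              rintro ⟨_, hc⟩
              apply h2
              refine ⟨hj4, ?_⟩
              rcases hc with hc | hc
              · exact Or.inl (by rw [List.drop_eq_nil_iff] at hc; omega)
              · exact Or.inr (by rw [pv_headD_drop] at hc; exact hc)
            have ht : total ≠ 0 := by
              have hv : card_value (mo.getD i (0, 0)) ≤ 10 := min_le_right _ _
              have hc : ¬ total + card_value (mo.getD i (0, 0)) ≤ 31 :=
                fun hc => h1 ⟨hi4, Or.inr hc⟩
              omega
            rw [pvGreedyA, if_pos hloop, if_neg h1, if_neg h2, if_pos ⟨hi4, hj4⟩]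
            rw [pvDeal, if_neg (fun hcc => hdm hcc.1), if_neg hfail1, if_neg hfail2]
            exact ih i j 0 seq hi hj (by
              rw [if_neg ht] at hf
              rw [if_pos (show (0 : Int) = 0 from rfl)]
              omega)
          · exfalso
            rcases Nat.lt_or_ge i 4 with hi4 | hi4
            · have hj4 : j = 4 := by
                rcases Nat.lt_or_ge j 4 with h | h
                · exact absurd ⟨hi4, h⟩ hij
                · omega
              exact h1 ⟨hi4, Or.inl hj4⟩
            · have hi4' : i = 4 := by omega
              have hj4 : j < 4 := by
                rcases hloop with h | h
                · omega
                · exact h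
              exact h2 ⟨hj4, Or.inl hi4'⟩
    · have hi4 : i = 4 := by omega
      have hj4 : j = 4 := by omega
      subst hi4; subst hj4
      rw [pvGreedyA, if_neg hloop]
      rw [List.drop_eq_nil_of_le (by omega), List.drop_eq_nil_of_le (by omega)]
      rw [pvDeal, if_pos ⟨rfl, rfl⟩]
      simp

theorem pvDeal_length : ∀ (fuel : Nat) (mine opp : List (Int × Int)) (total : Int),
    2 * (mine.length + opp.length) + (if total = 0 then 0 else 1) + 1 ≤ fuel →
    (pvDeal fuel mine opp total).length = mine.length + opp.length := by
  intro fuel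
  induction fuel with
  | zero =>
    intro mine opp total hf
    exfalso
    omega
  | succ fuel ih =>
    intro mine opp total hf
    by_cases hcc : mine = [] ∧ opp = []
    · rw [pvDeal, if_pos hcc, hcc.1, hcc.2]
      simp
    · by_cases h1 : mine ≠ [] ∧ (opp = [] ∨ total + card_value (mine.headD (0, 0)) ≤ 31)
      · rw [pvDeal, if_neg hcc, if_pos h1]
        have hm : mine.length ≠ 0 := fun h => h1.1 (List.eq_nil_of_length_eq_zero h)
        rw [List.length_cons, ih mine.tail opp _ (by
          simp only [List.length_tail]
          split_ifs at hf ⊢ <;> omega)]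
        simp only [List.length_tail]
        omega
      · by_cases h2 : opp ≠ [] ∧ (mine = [] ∨ total + card_value (opp.headD (0, 0)) ≤ 31)
        · rw [pvDeal, if_neg hcc, if_neg h1, if_pos h2]
          have ho : opp.length ≠ 0 := fun h => h2.1 (List.eq_nil_of_length_eq_zero h)
          rw [List.length_cons, ih mine opp.tail _ (by
            simp only [List.length_tail]
            split_ifs at hf ⊢ <;> omega)]
          simp only [List.length_tail]
          omega
        · rw [pvDeal, if_neg hcc, if_neg h1, if_neg h2]
          have hm : mine ≠ [] := by
            intro hm
            rcases (not_and_or.mp hcc) with h | h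
            · exact h hm
            · exact h2 ⟨h, Or.inl hm⟩
          have ht : total ≠ 0 := by
            have hv : card_value (mine.headD (0, 0)) ≤ 10 := min_le_right _ _
            have hc : ¬ (opp = [] ∨ total + card_value (mine.headD (0, 0)) ≤ 31) :=
              fun hc => h1 ⟨hm, hc⟩
            omega
          rw [ih mine opp 0 (by
            rw [if_neg ht] at hf
            rw [if_pos (show (0 : Int) = 0 from rfl)]
            omega)]

-- ---------- the outer maximum ----------

theorem pv_foldl_max_flatMap {α β : Type} (l1 : List α) (l2 : List β)
    (f : α → β → Int) (a : Int) :
    (l1.flatMap (fun x => l2.map (f x))).foldl max a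
      = l1.foldl (fun acc x => l2.foldl (fun acc y => max acc (f x y)) acc) a := by
  induction l1 generalizing a with
  | nil => simp
  | cons x t ih =>
    rw [List.flatMap_cons, List.foldl_append, List.foldl_map, List.foldl_cons, ih]

-- ===== VERDICT (by name: the statement is the Claim_ definition above) =====
theorem simulate_play_spec : Claim_equal_simulate_play := by
  intro my_hand opp_hand starter _hdom
  unfold Spec_simulate_play simulate_play simulate_play_alt
  rw [pv_foldl_max_flatMap]
  apply PySem.List.foldl_congr_mem
  intro acc mo hmo
  apply PySem.List.foldl_congr_mem
  intro acc2 oo hoo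
  have hmo4 : mo.length = 4 := PySem.List.length_of_mem_permutations hmo
  have hoo4 : oo.length = 4 := PySem.List.length_of_mem_permutations hoo
  dsimp only
  rw [pv_greedy_deal mo oo hmo4 hoo4 100 0 0 0 [] (by omega) (by omega)
    (by norm_num)]
  dsimp only
  rw [if_pos ⟨rfl, rfl⟩]
  rw [List.drop_zero, List.drop_zero, List.nil_append]
  rw [pv_score_eq _ (by
    rw [pvDeal_length 100 _ _ _ (by rw [hmo4, hoo4]; norm_num)]
    omega)]
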